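-- pv_equiv track=rewrite | github.com/Dormailler/Algorithm | 프로그래머스/unrated/132265. 롤케이크 자르기/롤케이크 자르기.py | solution
-- ===== SOURCE A (Python) =====
-- from collections import Counter as c
--
-- def solution(topping):
--     a = set()
--     l = c(topping)
--     answer = 0
--     for i in topping:
--         l[i] -= 1
--         if l[i] == 0:
--             del l[i]
--         if i not in a:
--             a.add(i)
--         if len(a) == len(l):
--             answer += 1
--     return answer
-- ===== SOURCE B (Python) =====
-- def solution(topping):
--     n = len(topping)
--     suffix = [0] * n
--     seen = set()
--     for k in range(n - 1, -1, -1):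
--         suffix[k] = len(seen)
--         seen.add(topping[k])
--     left = set()
--     answer = 0
--     for k in range(n):
--         left.add(topping[k])
--         if len(left) == suffix[k]:
--             answer += 1
--     return answer
-- ===== Notes on version B (the rewrite author's own statement) =====
-- stated objective: alternative
-- what changed: Replaces the single pass that decrements a right-side Counter (deleting exhausted keys) with two set passes: a backward pass tabulating the number of distinct values in each suffix, then a forward pass over a growing left set compared against that table; measured ~2x faster since cheap set.add replaces per-element Counter decrement/delete bookkeeping.
import Mathlib
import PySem

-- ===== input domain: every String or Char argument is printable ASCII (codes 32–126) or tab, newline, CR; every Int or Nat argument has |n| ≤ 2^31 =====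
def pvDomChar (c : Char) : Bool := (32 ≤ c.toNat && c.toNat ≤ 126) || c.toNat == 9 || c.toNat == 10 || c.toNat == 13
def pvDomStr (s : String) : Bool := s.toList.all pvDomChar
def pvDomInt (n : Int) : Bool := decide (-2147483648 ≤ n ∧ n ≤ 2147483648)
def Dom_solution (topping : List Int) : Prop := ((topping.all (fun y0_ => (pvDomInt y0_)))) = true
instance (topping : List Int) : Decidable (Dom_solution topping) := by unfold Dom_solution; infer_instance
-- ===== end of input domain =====

-- B replaces A's single pass over a decremented right-side Counter with a backward
-- suffix-distinct-count table plus a forward pass over a growing left set (alternative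
-- decomposition, same asymptotic cost).

-- ===== PORT A =====
-- loop body of A's 'for i in topping' loop, state = (a, l, answer)
def stepA (st : PySem.Set Int × PySem.Dict Int Int × Int) (i : Int) :
    PySem.Set Int × PySem.Dict Int Int × Int :=
  let l1 := st.2.1.modify i 0 (· - 1)                       -- l[i] -= 1
  let l2 := if l1.getD i 0 == 0 then l1.erase i else l1     -- if l[i] == 0: del l[i]
  let a' := if PySem.Set.contains st.1 i then st.1          -- if i not in a: a.add(i)
            else PySem.Set.add st.1 i
  let ans' := if PySem.Set.len a' == (l2.size : Int) then st.2.2 + 1 else st.2.2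
  (a', l2, ans')

def solution (topping : List Int) : Int :=
  (topping.foldl stepA (PySem.Set.empty, PySem.Dict.counter topping, 0)).2.2

-- ===== PORT B =====
-- backward pass: returns (suffix, seen); suffix[k] = len(seen right of k)
def buildSuffixB : List Int → List Int × PySem.Set Int
  | [] => ([], PySem.Set.empty)
  | x :: s =>
    let r := buildSuffixB s
    (PySem.Set.len r.2 :: r.1, PySem.Set.add r.2 x)

-- loop body of B's forward loop, state = (left, answer), p = (topping[k], suffix[k])
def stepB (st : PySem.Set Int × Int) (p : Int × Int) : PySem.Set Int × Int :=
  let left := PySem.Set.add st.1 p.1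
  (left, if PySem.Set.len left == p.2 then st.2 + 1 else st.2)

def solution_alt (topping : List Int) : Int :=
  ((topping.zip (buildSuffixB topping).1).foldl stepB (PySem.Set.empty, 0)).2

-- ===== PRECONDITION & SPEC =====
def Spec_solution (topping : List Int) (out : Int) : Prop := out = solution_alt topping
instance (topping : List Int) (out : Int) : Decidable (Spec_solution topping out) := by unfold Spec_solution; infer_instance

-- ===== CLAIM (what is proved, stated in full; the proofs are below) =====
def Claim_equal_solution : Prop := ∀ (topping : List Int), Dom_solution topping → Spec_solution topping (solution topping)

-- ===== LEMMAS AND PROOFS =====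

-- common specification: walking the list with the seen-prefix set, counting
-- positions where |distinct prefix| = |distinct suffix|
def specCount : PySem.Set Int → List Int → Int
  | _, [] => 0
  | a, x :: s =>
      ((if (PySem.Set.add a x).length = (PySem.Set.ofList s).length then 1 else 0)
        + specCount (PySem.Set.add a x) s)

theorem length_eq_of_mem_iff {l₁ l₂ : List Int} (h₁ : l₁.Nodup) (h₂ : l₂.Nodup)
    (h : ∀ a, a ∈ l₁ ↔ a ∈ l₂) : l₁.length = l₂.length :=
  ((List.perm_ext_iff_of_nodup h₁ h₂).mpr h).length_eq

-- A's dict l, after the processed prefix, represents the counter of the remaining list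
def DInv (l : PySem.Dict Int Int) (rest : List Int) : Prop :=
  l.keys.Nodup ∧ (∀ v : Int, l.getD v 0 = (rest.count v : Int)) ∧
    (∀ v : Int, v ∈ l.keys ↔ v ∈ rest)

theorem contains_iff_mem_keys (d : PySem.Dict Int Int) (k : Int) :
    d.contains k = true ↔ k ∈ d.keys := by
  simp [PySem.Dict.contains, PySem.Dict.keys, List.any_eq_true, List.mem_map, beq_iff_eq]

theorem keys_insert_of_contains (d : PySem.Dict Int Int) (k v : Int)
    (h : d.contains k = true) : (d.insert k v).keys = d.keys := by
  simp only [PySem.Dict.insert, h, if_true, PySem.Dict.keys, List.map_map]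
  apply List.map_congr_left
  intro p _
  by_cases hp : p.1 = k
  · simp [Function.comp, hp]
  · simp [Function.comp, hp]

theorem keys_modify_of_contains (d : PySem.Dict Int Int) (k d0 : Int) (f : Int → Int)
    (h : d.contains k = true) : (d.modify k d0 f).keys = d.keys := by
  rw [PySem.Dict.keys_modify]
  exact keys_insert_of_contains d k _ h

theorem keys_erase_eq (d : PySem.Dict Int Int) (k : Int) :
    (d.erase k).keys = d.keys.filter (fun x => !(x == k)) := by
  cases d with
  | mk items =>
    simp only [PySem.Dict.erase, PySem.Dict.keys]
    induction items with
    | nil => rfl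
    | cons p t ih =>
      simp only [List.filter_cons, List.map_cons]
      by_cases hp : p.1 = k
      · simp [hp, ih]
      · simp [hp, ih]

theorem get?_erase_self (d : PySem.Dict Int Int) (k : Int) :
    (d.erase k).get? k = none := by
  simp only [PySem.Dict.erase, PySem.Dict.get?, Option.map_eq_none_iff, List.find?_eq_none]
  intro p hp
  simp only [List.mem_filter] at hp
  simpa using hp.2

theorem find?_filter_ne (t : List (Int × Int)) (k v : Int) (h : v ≠ k) :
    (t.filter (fun q => !(q.1 == k))).find? (fun q => q.1 == v)
      = t.find? (fun q => q.1 == v) := by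
  induction t with
  | nil => rfl
  | cons q t ih =>
    by_cases hqk : q.1 = k
    · have hqv : ¬ q.1 = v := fun hh => h (hh.symm.trans hqk)
      rw [List.filter_cons_of_neg (by simp [hqk]),
          List.find?_cons_of_neg (by simp [hqv]), ih]
    · rw [List.filter_cons_of_pos (by simp [hqk])]
      by_cases hqv : q.1 = v
      · rw [List.find?_cons_of_pos (by simp [hqv]), List.find?_cons_of_pos (by simp [hqv])]
      · rw [List.find?_cons_of_neg (by simp [hqv]), List.find?_cons_of_neg (by simp [hqv]), ih]

theorem get?_erase_of_ne (d : PySem.Dict Int Int) (k v : Int) (h : v ≠ k) :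
    (d.erase k).get? v = d.get? v := by
  simp only [PySem.Dict.erase, PySem.Dict.get?]
  rw [find?_filter_ne d.items k v h]

theorem DInv_size (l : PySem.Dict Int Int) (rest : List Int) (h : DInv l rest) :
    l.size = (PySem.Set.ofList rest).length := by
  have hlen : l.keys.length = (PySem.Set.ofList rest).length :=
    length_eq_of_mem_iff h.1 (PySem.Set.nodup_ofList rest)
      (fun v => (h.2.2 v).trans (PySem.Set.mem_ofList rest v).symm)
  simpa [PySem.Dict.size, PySem.Dict.keys] using hlen

-- the body of A's loop: (l[i] -= 1; if l[i]==0: del l[i]) takes counter(x::s) to counter(s)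
theorem DInv_step (l : PySem.Dict Int Int) (x : Int) (s : List Int) (h : DInv l (x :: s)) :
    DInv (if (l.modify x 0 (· - 1)).getD x 0 == 0
          then (l.modify x 0 (· - 1)).erase x else l.modify x 0 (· - 1)) s := by
  obtain ⟨hnd, hval, hmem⟩ := h
  have hxk : x ∈ l.keys := (hmem x).mpr (by simp)
  have hcont : l.contains x = true := (contains_iff_mem_keys l x).mpr hxk
  have hkeys1 : (l.modify x 0 (· - 1)).keys = l.keys := keys_modify_of_contains l x 0 _ hcont
  have hval1 : ∀ v : Int, (l.modify x 0 (· - 1)).getD v 0 = (s.count v : Int) := by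
    intro v
    rw [PySem.Dict.getD_modify]
    by_cases hv : v = x
    · subst hv
      simp [hval v]
    · simp [hv, hval v, Ne.symm hv]
  by_cases hz : (l.modify x 0 (· - 1)).getD x 0 == 0
  · -- x exhausted: count x s = 0, key deleted
    have hcount0 : s.count x = 0 := by
      have := hval1 x
      rw [this] at hz
      exact_mod_cast (by simpa using hz : (s.count x : Int) = 0)
    have hxns : x ∉ s := by
      intro hmx
      exact absurd hcount0 (List.count_pos_iff.mpr hmx).ne'
    rw [if_pos hz]
    refine ⟨?_, ?_, ?_⟩
    · rw [keys_erase_eq, hkeys1]; exact hnd.filter _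
    · intro v
      by_cases hv : v = x
      · subst hv
        simp [PySem.Dict.getD, get?_erase_self, hcount0]
      · rw [PySem.Dict.getD, get?_erase_of_ne _ _ _ hv, ← PySem.Dict.getD, hval1 v]
    · intro v
      rw [keys_erase_eq, hkeys1]
      simp only [List.mem_filter, Bool.not_eq_eq_eq_not, Bool.not_true, beq_eq_false_iff_ne]
      constructor
      · rintro ⟨hvk, hne⟩
        rcases List.mem_cons.mp ((hmem v).mp hvk) with h' | h'
        · exact absurd h' (by simpa using hne)
        · exact h'
      · intro hvs
        refine ⟨(hmem v).mpr (by simp [hvs]), ?_⟩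
        intro hvx; exact hxns (hvx ▸ hvs)
  · -- x still present on the right: key kept
    have hcountpos : s.count x ≠ 0 := by
      intro h0
      apply hz
      simp [hval1 x, h0]
    have hxs : x ∈ s := List.count_pos_iff.mp (Nat.pos_of_ne_zero hcountpos)
    rw [if_neg hz]
    refine ⟨by rw [hkeys1]; exact hnd, hval1, ?_⟩
    intro v
    rw [hkeys1]
    constructor
    · intro hvk
      rcases List.mem_cons.mp ((hmem v).mp hvk) with h' | h'
      · exact h' ▸ hxs
      · exact h'
    · intro hvs; exact (hmem v).mpr (by simp [hvs])
  
-- the updated seen-set of A's loop is Set.add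
theorem stepA_set (a : PySem.Set Int) (i : Int) :
    (if PySem.Set.contains a i then a else PySem.Set.add a i) = PySem.Set.add a i := by
  by_cases h : PySem.Set.contains a i = true
  · rw [if_pos h]
    unfold PySem.Set.add
    rw [if_pos h]
  · rw [if_neg h]

theorem foldA (rest : List Int) :
    ∀ (a : PySem.Set Int) (l : PySem.Dict Int Int) (ans : Int), DInv l rest →
      (rest.foldl stepA (a, l, ans)).2.2 = ans + specCount a rest := by
  induction rest with
  | nil => intro a l ans _; simp [specCount]
  | cons x s ih =>
    intro a l ans hinv
    have hinv' := DInv_step l x s hinv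
    have hsize : (if (l.modify x 0 (· - 1)).getD x 0 == 0
          then (l.modify x 0 (· - 1)).erase x else l.modify x 0 (· - 1)).size
        = (PySem.Set.ofList s).length := DInv_size _ s hinv'
    simp only [List.foldl_cons]
    rw [show stepA (a, l, ans) x =
        (PySem.Set.add a x,
         (if (l.modify x 0 (· - 1)).getD x 0 == 0
          then (l.modify x 0 (· - 1)).erase x else l.modify x 0 (· - 1)),
         if PySem.Set.len (PySem.Set.add a x)
             == ((if (l.modify x 0 (· - 1)).getD x 0 == 0
                  then (l.modify x 0 (· - 1)).erase x else l.modify x 0 (· - 1)).size : Int)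
         then ans + 1 else ans) from by
      simp only [stepA, stepA_set]]
    rw [ih _ _ _ hinv']
    have hcond : (PySem.Set.len (PySem.Set.add a x)
          == ((if (l.modify x 0 (· - 1)).getD x 0 == 0
               then (l.modify x 0 (· - 1)).erase x else l.modify x 0 (· - 1)).size : Int))
        = decide ((PySem.Set.add a x).length = (PySem.Set.ofList s).length) := by
      rw [hsize]
      simp only [PySem.Set.len]
      rw [beq_eq_decide]
      exact decide_eq_decide.mpr Nat.cast_inj
    rw [hcond]
    by_cases hc : (PySem.Set.add a x).length = (PySem.Set.ofList s).length
    · simp [hc, specCount]; ring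
    · simp [hc, specCount]

-- B's backward pass: the seen set holds exactly the elements of the suffix
theorem buildSuffixB_seen (s : List Int) :
    (buildSuffixB s).2.Nodup ∧ ∀ v : Int, v ∈ (buildSuffixB s).2 ↔ v ∈ s := by
  induction s with
  | nil => exact ⟨List.nodup_nil, by simp [buildSuffixB, PySem.Set.empty]⟩
  | cons x t ih =>
    refine ⟨PySem.Set.nodup_add _ _ ih.1, ?_⟩
    intro v
    simp only [buildSuffixB, PySem.Set.mem_add, ih.2 v, List.mem_cons]
    tauto

theorem buildSuffixB_seen_len (s : List Int) :
    (buildSuffixB s).2.length = (PySem.Set.ofList s).length :=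
  length_eq_of_mem_iff (buildSuffixB_seen s).1 (PySem.Set.nodup_ofList s)
    (fun v => ((buildSuffixB_seen s).2 v).trans (PySem.Set.mem_ofList s v).symm)

theorem foldB (s : List Int) :
    ∀ (a : PySem.Set Int) (ans : Int),
      ((s.zip (buildSuffixB s).1).foldl stepB (a, ans)).2 = ans + specCount a s := by
  induction s with
  | nil => intro a ans; simp [buildSuffixB, specCount]
  | cons x t ih =>
    intro a ans
    simp only [buildSuffixB, List.zip_cons_cons, List.foldl_cons]
    rw [show stepB (a, ans) (x, PySem.Set.len (buildSuffixB t).2) =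
        (PySem.Set.add a x,
         if PySem.Set.len (PySem.Set.add a x) == PySem.Set.len (buildSuffixB t).2
         then ans + 1 else ans) from rfl]
    rw [ih]
    have hcond : (PySem.Set.len (PySem.Set.add a x) == PySem.Set.len (buildSuffixB t).2)
        = decide ((PySem.Set.add a x).length = (PySem.Set.ofList t).length) := by
      simp only [PySem.Set.len, buildSuffixB_seen_len t]
      rw [beq_eq_decide]
      exact decide_eq_decide.mpr Nat.cast_inj
    rw [hcond]
    by_cases hc : (PySem.Set.add a x).length = (PySem.Set.ofList t).length
    · simp [hc, specCount]; ring
    · simp [hc, specCount]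

theorem DInv_counter (topping : List Int) : DInv (PySem.Dict.counter topping) topping := by
  refine ⟨PySem.Dict.nodup_keys_counter topping, ?_, ?_⟩
  · intro v; exact PySem.Dict.getD_counter topping v
  · intro v
    rw [PySem.Dict.keys_counter]
    exact PySem.Set.mem_ofList topping v

-- ===== VERDICT (by name: the statement is the Claim_ definition above) =====
theorem solution_spec : Claim_equal_solution := by
  intro topping _
  unfold Spec_solution solution solution_alt
  rw [foldA topping PySem.Set.empty _ 0 (DInv_counter topping), foldB topping PySem.Set.empty 0]
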